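-- pv_equiv track=rewrite | github.com/yeardream-high6/coding_test | 이부경/LeetCode/10. Regular Expression Matching.py | get_sub_p
-- ===== SOURCE A (Python) =====
-- def get_sub_p(p):
--     i = 0
--     non_asterisk = ''
--     while i < len(p):
--         if i + 1 < len(p) and p[i + 1] == '*':
--             if len(non_asterisk) > 0:
--                 return non_asterisk
--
--             return '*' + p[i]
--         else:
--             non_asterisk += p[i]
--             i += 1
--     return non_asterisk
-- ===== SOURCE B (Python) =====
-- def get_sub_p(p):
--     s = p.find('*', 1)
--     if s == -1:
--         return p
--     if s > 1:
--         return p[:s - 1]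
--     return '*' + p[0]
-- ===== Notes on version B (the rewrite author's own statement) =====
-- stated objective: faster
-- what changed: Replaces the char-by-char scanning loop with its running string concatenation by a single locate-the-first-star-from-index-1 call followed by one slice.
import Mathlib
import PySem

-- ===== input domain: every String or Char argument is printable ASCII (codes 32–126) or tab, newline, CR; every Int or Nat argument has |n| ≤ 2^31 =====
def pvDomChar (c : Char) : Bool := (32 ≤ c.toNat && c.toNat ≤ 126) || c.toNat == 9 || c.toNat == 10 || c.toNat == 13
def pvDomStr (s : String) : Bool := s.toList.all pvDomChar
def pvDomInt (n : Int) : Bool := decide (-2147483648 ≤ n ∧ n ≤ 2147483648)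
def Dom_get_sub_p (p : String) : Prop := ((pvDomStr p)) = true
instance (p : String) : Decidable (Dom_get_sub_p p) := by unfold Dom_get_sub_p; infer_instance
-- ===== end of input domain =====

-- B replaces A's char-by-char accumulation loop by a single find('*', 1) plus one slice (simpler decomposition).

-- ===== PORT A =====
-- A's while loop: i is the index, acc is 'non_asterisk'; both indexings are guarded in range by the conditions
def getSubPLoop (cs : List Char) (i : Nat) (acc : List Char) : List Char :=
  if i < cs.length then
    if i + 1 < cs.length ∧ cs.getD (i + 1) ' ' = '*' then
      if acc.length > 0 then acc
      else '*' :: [cs.getD i ' ']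
    else getSubPLoop cs (i + 1) (acc ++ [cs.getD i ' '])
  else acc
termination_by cs.length - i

def get_sub_p (p : String) : String :=
  String.ofList (getSubPLoop p.toList 0 [])

-- ===== PORT B =====
def get_sub_p_alt (p : String) : String :=
  let s := PySem.Str.findFrom p "*" 1
  if s = -1 then p
  else if s > 1 then String.ofList (PySem.List.slice p.toList none (some (s - 1)))
  else String.ofList ('*' :: [p.toList.getD 0 ' '])  -- '*' + p[0]; s = 1 guarantees the index is in range

-- ===== PRECONDITION & SPEC =====
def Spec_get_sub_p (p : String) (out : String) : Prop := out = get_sub_p_alt p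
instance (p : String) (out : String) : Decidable (Spec_get_sub_p p out) := by unfold Spec_get_sub_p; infer_instance

-- ===== CLAIM (what is proved, stated in full; the proofs are below) =====
def Claim_equal_get_sub_p : Prop := ∀ (p : String), Dom_get_sub_p p → Spec_get_sub_p p (get_sub_p p)

-- ===== LEMMAS AND PROOFS =====

-- first index j ≥ k with cs[j] = '*' (proof-only device)
def firstStar (cs : List Char) (k : Nat) : Option Nat :=
  ((cs.drop k).findIdx? (· == '*')).map (k + ·)

lemma firstStar_ge (cs : List Char) (k j : Nat) (h : firstStar cs k = some j) : k ≤ j := by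
  unfold firstStar at h
  cases hf : (cs.drop k).findIdx? (· == '*') with
  | none => rw [hf] at h; simp at h
  | some a => rw [hf] at h; simp at h; omega

lemma firstStar_ge_len (cs : List Char) (k : Nat) (h : cs.length ≤ k) :
    firstStar cs k = none := by
  simp [firstStar, List.drop_eq_nil_of_le h]

lemma firstStar_step (cs : List Char) (k : Nat) (h : k < cs.length) :
    firstStar cs k = if cs.getD k ' ' = '*' then some k else firstStar cs (k + 1) := by
  have hd : cs.drop k = cs[k] :: cs.drop (k + 1) := List.drop_eq_getElem_cons h
  have hg : cs.getD k ' ' = cs[k] := List.getD_eq_getElem cs ' ' h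
  simp only [firstStar, hd, List.findIdx?_cons, hg]
  by_cases hc : cs[k] = '*'
  · simp [hc]
  · simp only [hc, beq_iff_eq, if_false, Option.map_map]
    congr 1
    funext j
    simp only [Function.comp_apply]
    omega

-- A's loop from position i ≥ 1 with acc = p[:i]: stops at the first star at index ≥ i+1
lemma loop_eq (cs : List Char) : ∀ n i, cs.length - i = n → 1 ≤ i → i ≤ cs.length →
    getSubPLoop cs i (cs.take i) =
      (match firstStar cs (i + 1) with
       | some j => cs.take (j - 1)
       | none => cs) := by
  intro n
  induction n with
  | zero =>
    intro i hn h1 h2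
    have hi : i = cs.length := by omega
    rw [getSubPLoop]
    simp [hi, firstStar_ge_len cs (cs.length + 1) (by omega)]
  | succ n ih =>
    intro i hn h1 h2
    have hi : i < cs.length := by omega
    rw [getSubPLoop, if_pos hi]
    by_cases hc : i + 1 < cs.length ∧ cs.getD (i + 1) ' ' = '*'
    · rw [if_pos hc]
      have hacc : (cs.take i).length > 0 := by
        simp [List.length_take]; omega
      rw [if_pos hacc]
      rw [firstStar_step cs (i + 1) hc.1, if_pos hc.2]
      simp
    · rw [if_neg hc]
      have htake : cs.take i ++ [cs.getD i ' '] = cs.take (i + 1) := by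
        rw [List.take_add_one]
        congr 1
        rw [List.getElem?_eq_getElem hi, List.getD_eq_getElem cs ' ' hi]
        rfl
      rw [htake, ih (i + 1) (by omega) (by omega) (by omega)]
      by_cases hlen : i + 1 < cs.length
      · have hne : cs.getD (i + 1) ' ' ≠ '*' := fun h => hc ⟨hlen, h⟩
        rw [firstStar_step cs (i + 1) hlen, if_neg hne]
      · rw [firstStar_ge_len cs (i + 1) (by omega),
            firstStar_ge_len cs (i + 2) (by omega)]

lemma prefix_singleton_drop (us : List Char) (c : Char) (m : Nat) :
    [c] <+: us.drop m ↔ us[m]? = some c := by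
  have hh : (us.drop m).head? = us[m]? := List.head?_drop
  constructor
  · rintro ⟨t, ht⟩
    rw [← hh, ← ht]; rfl
  · intro hx
    rw [← hh] at hx
    cases hd : us.drop m with
    | nil => rw [hd] at hx; simp at hx
    | cons x t =>
      rw [hd] at hx
      simp only [List.head?_cons, Option.some.injEq] at hx
      exact ⟨t, by simp [hd, hx]⟩

lemma findIdx?_char_none (us : List Char) (c : Char) :
    us.findIdx? (· == c) = none → ∀ m : Nat, us[m]? ≠ some c := by
  induction us with
  | nil => intro _ m; simp
  | cons x t ih =>
    intro h m
    rw [List.findIdx?_cons] at h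
    by_cases hx : x = c
    · simp [hx] at h
    · simp only [beq_iff_eq, if_neg hx] at h
      have ht : t.findIdx? (· == c) = none := by
        cases h' : t.findIdx? (· == c) <;> simp [h'] at h ⊢
      cases m with
      | zero => simp [hx]
      | succ m => simpa using ih ht m

lemma findIdx?_char_some (us : List Char) (c : Char) (j : Nat) :
    us.findIdx? (· == c) = some j → us[j]? = some c ∧ ∀ k : Nat, k < j → us[k]? ≠ some c := by
  induction us generalizing j with
  | nil => simp
  | cons x t ih =>
    intro h
    rw [List.findIdx?_cons] at h
    by_cases hx : x = c
    · rw [if_pos (by simp [hx])] at h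
      cases h
      exact ⟨by simp [hx], by omega⟩
    · simp only [beq_iff_eq, if_neg hx] at h
      cases hj : t.findIdx? (· == c) with
      | none => simp [hj] at h
      | some j' =>
        rw [hj] at h
        simp only [Option.map_some] at h
        obtain ⟨h1, h2⟩ := ih j' hj
        cases h
        refine ⟨by simpa using h1, ?_⟩
        intro k hk
        cases k with
        | zero => simpa using fun h' => hx h'
        | succ k => simpa using h2 k (by omega)

-- Chars.find for a single-character needle is findIdx?
lemma find_char_eq (us : List Char) (c : Char) :
    PySem.Chars.find us [c] =
      (match us.findIdx? (· == c) with
       | none => (-1 : Int)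
       | some j => (j : Int)) := by
  cases h : us.findIdx? (· == c) with
  | none =>
    show PySem.Chars.find us [c] = -1
    rw [PySem.Chars.find_eq_neg_one_iff]
    intro hinf
    have hc : c ∈ us := hinf.subset (List.mem_singleton_self c)
    obtain ⟨m, hm, hn⟩ := List.mem_iff_getElem.mp hc
    exact findIdx?_char_none us c h m (by rw [List.getElem?_eq_getElem hm, hn])
  | some j =>
    show PySem.Chars.find us [c] = (j : Int)
    obtain ⟨h1, h2⟩ := findIdx?_char_some us c j h
    have hmem : c ∈ us := List.mem_of_getElem? h1
    have hinf : [c] <:+: us := by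
      obtain ⟨s, t, hst⟩ := List.append_of_mem hmem
      exact ⟨s, t, by simp [hst]⟩
    have hnn : 0 ≤ PySem.Chars.find us [c] := (PySem.Chars.find_nonneg_iff us [c]).mpr hinf
    obtain ⟨hp, hmin⟩ := PySem.Chars.find_spec hnn
    have hfj : (PySem.Chars.find us [c]).toNat = j := by
      have hle1 : ¬ (PySem.Chars.find us [c]).toNat < j :=
        fun hlt => h2 _ hlt ((prefix_singleton_drop us c _).mp hp)
      have hle2 : ¬ j < (PySem.Chars.find us [c]).toNat :=
        fun hlt => hmin j hlt ((prefix_singleton_drop us c j).mpr h1)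
      omega
    omega

-- B's find('*', 1) on a nonempty string, in terms of firstStar
lemma alt_s_eq (cs : List Char) (h : 1 ≤ cs.length) :
    PySem.Chars.findFrom cs ['*'] 1 none =
      (match firstStar cs 1 with
       | none => (-1 : Int)
       | some j => (j : Int)) := by
  have hf := PySem.Chars.findFrom_natCast cs ['*'] 1 h
  simp only [Nat.cast_one] at hf
  rw [hf, find_char_eq (cs.drop 1) '*']
  unfold firstStar
  cases hj : (cs.drop 1).findIdx? (· == '*') with
  | none => simp
  | some j =>
    simp only [Option.map_some]
    rw [if_neg (by omega : ¬ ((j : Int) = -1))]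
    show (1 : Int) + (j : Int) = ((1 + j : Nat) : Int)
    push_cast; ring

theorem get_sub_p_eq (p : String) : get_sub_p p = get_sub_p_alt p := by
  by_cases hnil : p.toList = []
  · have hp : p = "" := by
      have h2 := congrArg String.ofList hnil
      simpa using h2
    subst hp
    unfold get_sub_p get_sub_p_alt
    have hff : PySem.Str.findFrom "" "*" 1 = -1 := by
      simp only [PySem.Str.findFrom_eq]; decide
    rw [hff, getSubPLoop]
    simp
  · have hlen1 : 1 ≤ p.toList.length := by
      cases h : p.toList with
      | nil => exact absurd h hnil
      | cons c t => simp
    unfold get_sub_p get_sub_p_alt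
    simp only [PySem.Str.findFrom_eq]
    have hstar : ("*" : String).toList = ['*'] := by decide
    rw [hstar, alt_s_eq p.toList hlen1]
    by_cases hc1 : 1 < p.toList.length ∧ p.toList.getD 1 ' ' = '*'
    · -- star at index 1 : A returns '*' + p[0]; B's s = 1
      have hfs : firstStar p.toList 1 = some 1 := by
        rw [firstStar_step p.toList 1 hc1.1, if_pos hc1.2]
      rw [hfs, getSubPLoop, if_pos (by omega), if_pos ⟨by omega, hc1.2⟩]
      norm_num
    · -- no star at index 1 : A steps once, then the loop invariant applies at i = 1
      have hA : getSubPLoop p.toList 0 [] = getSubPLoop p.toList 1 (p.toList.take 1) := by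
        rw [getSubPLoop, if_pos (by omega), if_neg hc1]
        congr 1
        rw [List.take_add_one]
        simp only [List.take_zero, List.nil_append]
        rw [List.getElem?_eq_getElem (by omega), List.getD_eq_getElem p.toList ' ' (by omega)]
        rfl
      rw [hA, loop_eq p.toList (p.toList.length - 1) 1 (by omega) le_rfl hlen1]
      have hfs : firstStar p.toList 2 = firstStar p.toList 1 := by
        by_cases h1 : 1 < p.toList.length
        · rw [firstStar_step p.toList 1 h1, if_neg (fun h => hc1 ⟨h1, h⟩)]
        · rw [firstStar_ge_len p.toList 1 (by omega), firstStar_ge_len p.toList 2 (by omega)]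
      rw [hfs]
      cases hj : firstStar p.toList 1 with
      | none => simp
      | some j =>
        have hj2 : 2 ≤ j := firstStar_ge p.toList 2 j (hfs.trans hj)
        simp only
        rw [if_neg (by omega : ¬ ((j : Int) = -1)), if_pos (by omega : (1 : Int) < (j : Int))]
        congr 1
        have hc : (j : Int) - 1 = ((j - 1 : Nat) : Int) := by omega
        rw [hc, PySem.List.slice_to_natCast]

-- ===== VERDICT (by name: the statement is the Claim_ definition above) =====
theorem get_sub_p_spec : Claim_equal_get_sub_p := by
  intro p _
  exact get_sub_p_eq p
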